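-- pv_equiv track=rewrite | github.com/yoni206/invertibility | scripts/analyze_results.py | get_red_encodings
-- ===== SOURCE A (Python) =====
-- def get_red_encodings(redundents, encodings, configurations):
--     result = []
--     for enc in encodings:
--         red = True
--         for conf in configurations:
--             if [enc, conf] not in redundents:
--                 red = False
--         if red:
--             result.append(enc)
--     return result
-- ===== SOURCE B (Python) =====
-- def get_red_encodings(redundents, encodings, configurations):
--     present = {}
--     for entry in redundents:
--         if isinstance(entry, list) and len(entry) == 2:
--             present.setdefault(entry[0], set()).add(entry[1])
--     want = set(configurations)
--     empty = set()
--     return [enc for enc in encodings if want <= present.get(enc, empty)]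
-- ===== Notes on version B (the rewrite author's own statement) =====
-- stated objective: faster
-- what changed: One pass over redundents builds a dict mapping each encoding to the set of configurations it is paired with, then each encoding is kept iff set(configurations) is a subset of its entry, replacing the per-(encoding,configuration) linear scans of the redundents list.
import Mathlib
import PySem

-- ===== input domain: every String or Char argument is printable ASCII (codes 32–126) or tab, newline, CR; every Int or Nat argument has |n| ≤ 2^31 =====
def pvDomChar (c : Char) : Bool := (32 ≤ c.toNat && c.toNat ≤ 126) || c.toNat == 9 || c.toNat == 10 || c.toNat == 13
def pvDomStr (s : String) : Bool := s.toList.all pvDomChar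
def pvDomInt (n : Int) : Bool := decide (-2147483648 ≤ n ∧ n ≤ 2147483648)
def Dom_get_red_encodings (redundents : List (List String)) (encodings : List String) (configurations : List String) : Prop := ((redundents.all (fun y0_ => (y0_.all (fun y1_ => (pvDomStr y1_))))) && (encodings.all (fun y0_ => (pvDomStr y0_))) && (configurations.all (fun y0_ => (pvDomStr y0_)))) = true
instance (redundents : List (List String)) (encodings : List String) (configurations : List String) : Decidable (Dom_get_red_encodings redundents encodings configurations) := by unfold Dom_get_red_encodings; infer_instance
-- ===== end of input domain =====

-- B replaces A's per-(encoding,configuration) scans of `redundents` with one pass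
-- that indexes redundents into a dict of sets, then a subset test per encoding (faster).

-- ===== PORT A =====
def get_red_encodings (redundents : List (List String)) (encodings : List String) (configurations : List String) : List String :=
  encodings.foldl (fun result enc =>
    let red := configurations.foldl (fun red conf =>
      if [enc, conf] ∉ redundents then false else red) true
    if red then result ++ [enc] else result) []

-- ===== PORT B =====
-- step of B's index-building loop: record entry only if it is a 2-element list
def pvRedStep (d : PySem.Dict String (PySem.Set String)) (entry : List String) : PySem.Dict String (PySem.Set String) :=
  match entry with
  | [a, b] => d.modify a PySem.Set.empty (fun s => PySem.Set.add s b)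
  | _ => d

def get_red_encodings_alt (redundents : List (List String)) (encodings : List String) (configurations : List String) : List String :=
  let present := redundents.foldl pvRedStep PySem.Dict.empty
  let want : PySem.Set String := PySem.Set.ofList configurations
  encodings.filter (fun enc => PySem.Set.issubset want (present.getD enc PySem.Set.empty))

-- ===== PRECONDITION & SPEC =====
def Spec_get_red_encodings (redundents : List (List String)) (encodings : List String) (configurations : List String) (out : List String) : Prop := out = get_red_encodings_alt redundents encodings configurations
instance (redundents : List (List String)) (encodings : List String) (configurations : List String) (out : List String) : Decidable (Spec_get_red_encodings redundents encodings configurations out) := by unfold Spec_get_red_encodings; infer_instance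

-- ===== CLAIM (what is proved, stated in full; the proofs are below) =====
def Claim_equal_get_red_encodings : Prop := ∀ (redundents : List (List String)) (encodings : List String) (configurations : List String), Dom_get_red_encodings redundents encodings configurations → Spec_get_red_encodings redundents encodings configurations (get_red_encodings redundents encodings configurations)

-- ===== LEMMAS AND PROOFS =====

-- A's inner flag loop computes `b && all confs paired`
theorem pv_inner_fold (redundents : List (List String)) (enc : String) :
    ∀ (cs : List String) (b : Bool),
      cs.foldl (fun red conf => if [enc, conf] ∉ redundents then false else red) b
        = (b && cs.all (fun conf => decide ([enc, conf] ∈ redundents))) := by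
  intro cs
  induction cs with
  | nil => intro b; simp
  | cons c cs ih =>
    intro b
    simp only [List.foldl_cons, List.all_cons, ih]
    by_cases h : [enc, c] ∈ redundents <;> simp [h]

-- membership in B's index after folding a suffix of redundents
theorem pv_build_mem (enc conf : String) :
    ∀ (rs : List (List String)) (d : PySem.Dict String (PySem.Set String)),
      conf ∈ (rs.foldl pvRedStep d).getD enc PySem.Set.empty
        ↔ conf ∈ d.getD enc PySem.Set.empty ∨ [enc, conf] ∈ rs := by
  intro rs
  induction rs with
  | nil => intro d; simp
  | cons e rs ih =>
    intro d
    simp only [List.foldl_cons, List.mem_cons]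
    match e with
    | [a, b] =>
      rw [ih]
      simp only [pvRedStep, PySem.Dict.getD_modify]
      by_cases h : enc = a
      · subst h
        simp only [List.cons.injEq, true_and, and_true]
        rw [if_pos trivial]
        simp only [PySem.Set.mem_add]
        tauto
      · rw [if_neg h]
        constructor
        · rintro (h1 | h1)
          · exact Or.inl h1
          · exact Or.inr (Or.inr h1)
        · rintro (h1 | h1 | h1)
          · exact Or.inl h1
          · simp only [List.cons.injEq] at h1; exact absurd h1.1 h
          · exact Or.inr h1
    | [] =>
      simp only [pvRedStep, ih]
      constructor
      · rintro (h1 | h1)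
        · exact Or.inl h1
        · exact Or.inr (Or.inr h1)
      · rintro (h1 | h1 | h1)
        · exact Or.inl h1
        · exact absurd h1 (by simp)
        · exact Or.inr h1
    | [a] =>
      simp only [pvRedStep, ih]
      constructor
      · rintro (h1 | h1)
        · exact Or.inl h1
        · exact Or.inr (Or.inr h1)
      · rintro (h1 | h1 | h1)
        · exact Or.inl h1
        · exact absurd h1 (by simp)
        · exact Or.inr h1
    | a :: b :: c :: rest =>
      simp only [pvRedStep, ih]
      constructor
      · rintro (h1 | h1)
        · exact Or.inl h1
        · exact Or.inr (Or.inr h1)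
      · rintro (h1 | h1 | h1)
        · exact Or.inl h1
        · exact absurd h1 (by simp)
        · exact Or.inr h1

-- ===== VERDICT (by name: the statement is the Claim_ definition above) =====
theorem get_red_encodings_spec : Claim_equal_get_red_encodings := by
  intro redundents encodings configurations _
  unfold Spec_get_red_encodings get_red_encodings get_red_encodings_alt
  simp only [pv_inner_fold, Bool.true_and]
  rw [PySem.List.foldl_append_if_eq_filter]
  simp only [List.nil_append]
  apply List.filter_congr
  intro enc _
  rw [Bool.eq_iff_iff, PySem.Set.issubset_iff]
  simp only [List.all_eq_true, decide_eq_true_eq, PySem.Set.mem_ofList, pv_build_mem]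
  have hemp : ∀ c : String, c ∈ (PySem.Dict.empty : PySem.Dict String (PySem.Set String)).getD enc PySem.Set.empty ↔ False := by
    simp [PySem.Dict.empty, PySem.Dict.getD, PySem.Dict.get?, PySem.Set.empty]
  simp only [hemp, false_or]
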